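-- pv_equiv track=rewrite | github.com/jackdpond/WordTree | wordtree.py | check_tree
-- ===== SOURCE A (Python) =====
-- def breadth_first(tree):
--     result = ''
--     for char in tree.values():
--         result += char
--     return result
--
-- def pre_order(tree):
--     word = []
--     def traverse(key, tree):
--         if key in tree.keys():
--             word.append(tree[key])
--             traverse((2*key)+1, tree)
--             traverse((2*key)+2, tree)
--     traverse(0, tree)
--     return ''.join(word)
--
-- def in_order(tree):
--     word = []
--     def traverse(key, tree):
--         if key in tree.keys():
--             traverse((2*key)+1, tree)
--             word.append(tree[key])
--             traverse((2*key)+2, tree)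
--     traverse(0, tree)
--     return ''.join(word)
--
-- def post_order(tree):
--     word = []
--     def traverse(key, tree):
--         if key not in tree.keys():
--             return
--         traverse((2*key)+1, tree)
--         traverse((2*key)+2, tree)
--         word.append(tree[key])
--     traverse(0, tree)
--     return ''.join(word)
--
-- def check_tree(tree, n, words):
--     #words = find_words(len(combo))
--     #tree = make_tree(combo, array)
--
--     count = 0
--     pre = pre_order(tree)
--     ino = in_order(tree)
--     post = post_order(tree)
--     bf = breadth_first(tree)
--     true_trav = []
--     used = []
--     for trav in [pre, ino, post, bf]:
--         if trav in words and trav not in used: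
--             count += 1
--             used.append(trav)
--             true_trav.append(trav)
--     if count >= n:
--         return tree, true_trav
--     else:
--         return None
-- ===== SOURCE B (Python) =====
-- # Iterative stack-based traversals (pre: push right-then-left; post: reversed
-- # right-first pre-order; in: left-descend with explicit stack) replacing A's
-- # nested recursive closures; dedup loop kept, count/used folded into one list.
--
-- def _pre_order_iter(tree):
--     out = []
--     stack = [0]
--     while stack:
--         k = stack.pop()
--         if k in tree:
--             out.append(tree[k])
--             stack.append(2 * k + 2)
--             stack.append(2 * k + 1)
--     return ''.join(out)
--
-- def _post_order_iter(tree):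
--     out = []
--     stack = [0]
--     while stack:
--         k = stack.pop()
--         if k in tree:
--             out.append(tree[k])
--             stack.append(2 * k + 1)
--             stack.append(2 * k + 2)
--     return ''.join(reversed(out))
--
-- def _in_order_iter(tree):
--     out = []
--     stack = []
--     cur = 0
--     while True:
--         if cur in tree:
--             stack.append(cur)
--             cur = 2 * cur + 1
--         elif stack:
--             k = stack.pop()
--             out.append(tree[k])
--             cur = 2 * k + 2
--         else:
--             break
--     return ''.join(out)
--
-- def check_tree(tree, n, words):
--     cands = [_pre_order_iter(tree), _in_order_iter(tree),
--              _post_order_iter(tree), ''.join(tree.values())]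
--     true_trav = []
--     for t in cands:
--         if t in words and t not in true_trav:
--             true_trav.append(t)
--     if len(true_trav) >= n:
--         return tree, true_trav
--     return None
-- ===== Notes on version B (the rewrite author's own statement) =====
-- stated objective: alternative
-- what changed: The three recursive closure-based DFS traversals are replaced by iterative explicit-stack loops (pre-order: pop-and-push right/left; post-order: reversed right-first pre-order; in-order: left-descend loop with a stack), and the count/used/true_trav triple of the final loop is folded into a single deduplicating list.
import Mathlib
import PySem

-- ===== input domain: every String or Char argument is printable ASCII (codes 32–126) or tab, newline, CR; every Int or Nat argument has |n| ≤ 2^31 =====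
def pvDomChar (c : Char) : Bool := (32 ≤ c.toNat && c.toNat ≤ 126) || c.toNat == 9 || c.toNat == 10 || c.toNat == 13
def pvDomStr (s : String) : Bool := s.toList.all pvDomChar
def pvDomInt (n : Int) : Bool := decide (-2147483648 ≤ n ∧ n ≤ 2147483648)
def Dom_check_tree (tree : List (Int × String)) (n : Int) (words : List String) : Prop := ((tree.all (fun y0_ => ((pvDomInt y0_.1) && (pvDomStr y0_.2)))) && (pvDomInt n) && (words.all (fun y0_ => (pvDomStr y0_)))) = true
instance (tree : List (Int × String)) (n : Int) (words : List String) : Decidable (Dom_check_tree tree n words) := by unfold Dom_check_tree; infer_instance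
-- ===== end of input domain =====

-- B replaces the three recursive closure-based traversals by iterative explicit-stack
-- loops and folds the count/used/true_trav triple into one deduplicating list;
-- alternative decomposition, same cost, no speed claim.

-- ===== PORT A =====

-- dict lookup (first match, as PySem.Dict) and a bound on present keys (for termination only)
def tget (tree : List (Int × String)) (k : Int) : Option String := PySem.Dict.get? ⟨tree⟩ k

def bnd (tree : List (Int × String)) : Nat := tree.foldl (fun m p => max m (p.1.natAbs + 1)) 0

theorem foldl_max_mono (l : List (Int × String)) (a b : Nat) (h : a ≤ b) :
    l.foldl (fun m p => max m (p.1.natAbs + 1)) a ≤ l.foldl (fun m p => max m (p.1.natAbs + 1)) b := by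
  induction l generalizing a b with
  | nil => simpa
  | cons p rest ih =>
    simp only [List.foldl]
    exact ih _ _ (by omega)

theorem le_bnd_foldl (tree : List (Int × String)) (m : Nat) :
    m ≤ tree.foldl (fun m p => max m (p.1.natAbs + 1)) m := by
  induction tree generalizing m with
  | nil => simp
  | cons p rest ih => exact le_trans (le_trans (le_max_left _ _) (ih _)) (le_of_eq rfl)

theorem tget_some_lt_bnd (tree : List (Int × String)) (k : Int) (v : String)
    (h : tget tree k = some v) : k.natAbs < bnd tree := by
  induction tree with
  | nil => simp [tget, PySem.Dict.get?] at h
  | cons p rest ih =>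
    rw [tget, PySem.Dict.get?_mk_cons] at h
    by_cases hk : p.1 == k
    · have hpk : p.1 = k := eq_of_beq hk
      subst hpk
      have h1 : p.1.natAbs < max 0 (p.1.natAbs + 1) := by omega
      exact lt_of_lt_of_le h1 (le_bnd_foldl rest _)
    · simp only [hk, Bool.false_eq_true, if_false] at h
      have h2 : k.natAbs < bnd rest := ih (by simpa [tget] using h)
      exact lt_of_lt_of_le h2 (foldl_max_mono rest 0 _ (by omega))

-- A's nested `traverse` closures, word-accumulator passed explicitly
def travPre (tree : List (Int × String)) (key : Nat) (word : List String) : List String :=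
  match h : tget tree (key : Int) with
  | some v => travPre tree (2*key+2) (travPre tree (2*key+1) (word ++ [v]))
  | none => word
termination_by bnd tree - key
decreasing_by
  all_goals
    have hb := tget_some_lt_bnd tree (key : Int) v h
    simp at hb; omega

def travIn (tree : List (Int × String)) (key : Nat) (word : List String) : List String :=
  match h : tget tree (key : Int) with
  | some v => travIn tree (2*key+2) ((travIn tree (2*key+1) word) ++ [v])
  | none => word
termination_by bnd tree - key
decreasing_by
  all_goals
    have hb := tget_some_lt_bnd tree (key : Int) v h
    simp at hb; omega

def travPost (tree : List (Int × String)) (key : Nat) (word : List String) : List String :=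
  match h : tget tree (key : Int) with
  | some v => (travPost tree (2*key+2) (travPost tree (2*key+1) word)) ++ [v]
  | none => word
termination_by bnd tree - key
decreasing_by
  all_goals
    have hb := tget_some_lt_bnd tree (key : Int) v h
    simp at hb; omega

def pre_order (tree : List (Int × String)) : String := PySem.Str.join "" (travPre tree 0 [])
def in_order (tree : List (Int × String)) : String := PySem.Str.join "" (travIn tree 0 [])
def post_order (tree : List (Int × String)) : String := PySem.Str.join "" (travPost tree 0 [])

def breadth_first (tree : List (Int × String)) : String :=
  (PySem.Dict.values (⟨tree⟩ : PySem.Dict Int String)).foldl (fun r c => r ++ c) ""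

def check_tree (tree : List (Int × String)) (n : Int) (words : List String) : Option ((List (Int × String)) × List String) :=
  let pre := pre_order tree
  let ino := in_order tree
  let post := post_order tree
  let bf := breadth_first tree
  let st := [pre, ino, post, bf].foldl
    (fun (s : Int × List String × List String) trav =>
      if words.contains trav && !(s.2.1.contains trav) then
        (s.1 + 1, s.2.1 ++ [trav], s.2.2 ++ [trav])
      else s)
    (0, [], [])
  if n ≤ st.1 then some (tree, st.2.2) else none

-- ===== PORT B =====

def loopPre (tree : List (Int × String)) (stack : List Nat) (out : List String) : List String :=
  match stack with
  | [] => out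
  | k :: rest =>
    match h : tget tree (k : Int) with
    | some v => loopPre tree ((2*k+1) :: (2*k+2) :: rest) (out ++ [v])
    | none => loopPre tree rest out
termination_by (stack.map (fun k => 3 ^ (bnd tree - k))).sum
decreasing_by
  · have hb := tget_some_lt_bnd tree (k : Int) v h
    simp at hb
    simp only [List.map, List.sum_cons]
    have h1 : 3 ^ (bnd tree - (2*k+1)) + 3 ^ (bnd tree - (2*k+2)) < 3 ^ (bnd tree - k) := by
      have e1 : 3 ^ (bnd tree - (2*k+1)) ≤ 3 ^ (bnd tree - k - 1) :=
        Nat.pow_le_pow_right (by omega) (by omega)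
      have e2 : 3 ^ (bnd tree - (2*k+2)) ≤ 3 ^ (bnd tree - k - 1) :=
        Nat.pow_le_pow_right (by omega) (by omega)
      have e3 : bnd tree - k = (bnd tree - k - 1) + 1 := by omega
      have e4 : 3 ^ (bnd tree - k) = 3 * 3 ^ (bnd tree - k - 1) := by
        rw [e3, pow_succ, Nat.add_sub_cancel, Nat.mul_comm]
      have e5 : 1 ≤ 3 ^ (bnd tree - k - 1) := Nat.one_le_pow _ _ (by omega)
      omega
    omega
  · simp only [List.map, List.sum_cons]
    have : 1 ≤ 3 ^ (bnd tree - k) := Nat.one_le_pow _ _ (by omega)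
    omega

def loopPost (tree : List (Int × String)) (stack : List Nat) (out : List String) : List String :=
  match stack with
  | [] => out
  | k :: rest =>
    match h : tget tree (k : Int) with
    | some v => loopPost tree ((2*k+2) :: (2*k+1) :: rest) (out ++ [v])
    | none => loopPost tree rest out
termination_by (stack.map (fun k => 3 ^ (bnd tree - k))).sum
decreasing_by
  · have hb := tget_some_lt_bnd tree (k : Int) v h
    simp at hb
    simp only [List.map, List.sum_cons]
    have h1 : 3 ^ (bnd tree - (2*k+2)) + 3 ^ (bnd tree - (2*k+1)) < 3 ^ (bnd tree - k) := by
      have e1 : 3 ^ (bnd tree - (2*k+1)) ≤ 3 ^ (bnd tree - k - 1) :=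
        Nat.pow_le_pow_right (by omega) (by omega)
      have e2 : 3 ^ (bnd tree - (2*k+2)) ≤ 3 ^ (bnd tree - k - 1) :=
        Nat.pow_le_pow_right (by omega) (by omega)
      have e3 : bnd tree - k = (bnd tree - k - 1) + 1 := by omega
      have e4 : 3 ^ (bnd tree - k) = 3 * 3 ^ (bnd tree - k - 1) := by
        rw [e3, pow_succ, Nat.add_sub_cancel, Nat.mul_comm]
      have e5 : 1 ≤ 3 ^ (bnd tree - k - 1) := Nat.one_le_pow _ _ (by omega)
      omega
    omega
  · simp only [List.map, List.sum_cons]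
    have : 1 ≤ 3 ^ (bnd tree - k) := Nat.one_le_pow _ _ (by omega)
    omega

def loopIn (tree : List (Int × String)) (cur : Nat) (stack : List Nat) (out : List String) : List String :=
  match h : tget tree (cur : Int) with
  | some _ => loopIn tree (2*cur+1) (cur :: stack) out
  | none =>
    match stack with
    | [] => out
    | k :: rest => loopIn tree (2*k+2) rest (out ++ [(tget tree (k : Int)).getD ""])
termination_by (1 + 4 ^ (bnd tree - cur)) + (stack.map (fun k => 1 + 4 ^ (bnd tree - (2*k+2)))).sum
decreasing_by
  · rename_i v
    have hb := tget_some_lt_bnd tree (cur : Int) v h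
    simp at hb
    simp only [List.map, List.sum_cons]
    have e1 : 4 ^ (bnd tree - (2*cur+1)) ≤ 4 ^ (bnd tree - cur - 1) :=
      Nat.pow_le_pow_right (by omega) (by omega)
    have e2 : 4 ^ (bnd tree - (2*cur+2)) ≤ 4 ^ (bnd tree - cur - 1) :=
      Nat.pow_le_pow_right (by omega) (by omega)
    have e3 : bnd tree - cur = (bnd tree - cur - 1) + 1 := by omega
    have e4 : 4 ^ (bnd tree - cur) = 4 * 4 ^ (bnd tree - cur - 1) := by
      rw [e3, pow_succ, Nat.add_sub_cancel, Nat.mul_comm]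
    have e5 : 1 ≤ 4 ^ (bnd tree - cur - 1) := Nat.one_le_pow _ _ (by omega)
    omega
  · simp only [List.map, List.sum_cons]
    have : 1 ≤ 4 ^ (bnd tree - cur) := Nat.one_le_pow _ _ (by omega)
    omega

def pre_order_alt (tree : List (Int × String)) : String := PySem.Str.join "" (loopPre tree [0] [])
def post_order_alt (tree : List (Int × String)) : String := PySem.Str.join "" (loopPost tree [0] []).reverse
def in_order_alt (tree : List (Int × String)) : String := PySem.Str.join "" (loopIn tree 0 [] [])

def bf_alt (tree : List (Int × String)) : String :=
  PySem.Str.join "" (PySem.Dict.values (⟨tree⟩ : PySem.Dict Int String))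

def check_tree_alt (tree : List (Int × String)) (n : Int) (words : List String) : Option ((List (Int × String)) × List String) :=
  let cands := [pre_order_alt tree, in_order_alt tree, post_order_alt tree, bf_alt tree]
  let tt := cands.foldl
    (fun (acc : List String) t =>
      if words.contains t && !(acc.contains t) then acc ++ [t] else acc) []
  if n ≤ (tt.length : Int) then some (tree, tt) else none

-- ===== PRECONDITION & SPEC =====
def Spec_check_tree (tree : List (Int × String)) (n : Int) (words : List String) (out : Option ((List (Int × String)) × List String)) : Prop := out = check_tree_alt tree n words
instance (tree : List (Int × String)) (n : Int) (words : List String) (out : Option ((List (Int × String)) × List String)) : Decidable (Spec_check_tree tree n words out) := by unfold Spec_check_tree; infer_instance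

-- ===== CLAIM (what is proved, stated in full; the proofs are below) =====
def Claim_equal_check_tree : Prop := ∀ (tree : List (Int × String)) (n : Int) (words : List String), Dom_check_tree tree n words → Spec_check_tree tree n words (check_tree tree n words)

-- ===== LEMMAS AND PROOFS =====

-- pure emission of each traversal, used to relate A's accumulator recursion to B's stack loops
def EPre (tree : List (Int × String)) (key : Nat) : List String :=
  match h : tget tree (key : Int) with
  | some v => v :: (EPre tree (2*key+1) ++ EPre tree (2*key+2))
  | none => []
termination_by bnd tree - key
decreasing_by all_goals (have hb := tget_some_lt_bnd tree (key : Int) v h; simp at hb; omega)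

def EIn (tree : List (Int × String)) (key : Nat) : List String :=
  match h : tget tree (key : Int) with
  | some v => EIn tree (2*key+1) ++ v :: EIn tree (2*key+2)
  | none => []
termination_by bnd tree - key
decreasing_by all_goals (have hb := tget_some_lt_bnd tree (key : Int) v h; simp at hb; omega)

def EPost (tree : List (Int × String)) (key : Nat) : List String :=
  match h : tget tree (key : Int) with
  | some v => (EPost tree (2*key+1) ++ EPost tree (2*key+2)) ++ [v]
  | none => []
termination_by bnd tree - key
decreasing_by all_goals (have hb := tget_some_lt_bnd tree (key : Int) v h; simp at hb; omega)

-- right-first pre-order emission (what loopPost produces before the final reverse)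
def RPre (tree : List (Int × String)) (key : Nat) : List String :=
  match h : tget tree (key : Int) with
  | some v => v :: (RPre tree (2*key+2) ++ RPre tree (2*key+1))
  | none => []
termination_by bnd tree - key
decreasing_by all_goals (have hb := tget_some_lt_bnd tree (key : Int) v h; simp at hb; omega)

theorem EPre_some (tree : List (Int × String)) (key : Nat) (v : String) (h : tget tree (key : Int) = some v) :
    EPre tree key = v :: (EPre tree (2*key+1) ++ EPre tree (2*key+2)) := by
  rw [EPre]; split <;> simp_all

theorem EPre_none (tree : List (Int × String)) (key : Nat) (h : tget tree (key : Int) = none) :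
    EPre tree key = [] := by
  rw [EPre]; split <;> simp_all

theorem EIn_some (tree : List (Int × String)) (key : Nat) (v : String) (h : tget tree (key : Int) = some v) :
    EIn tree key = EIn tree (2*key+1) ++ v :: EIn tree (2*key+2) := by
  rw [EIn]; split <;> simp_all

theorem EIn_none (tree : List (Int × String)) (key : Nat) (h : tget tree (key : Int) = none) :
    EIn tree key = [] := by
  rw [EIn]; split <;> simp_all

theorem EPost_some (tree : List (Int × String)) (key : Nat) (v : String) (h : tget tree (key : Int) = some v) :
    EPost tree key = (EPost tree (2*key+1) ++ EPost tree (2*key+2)) ++ [v] := by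
  rw [EPost]; split <;> simp_all

theorem EPost_none (tree : List (Int × String)) (key : Nat) (h : tget tree (key : Int) = none) :
    EPost tree key = [] := by
  rw [EPost]; split <;> simp_all

theorem RPre_some (tree : List (Int × String)) (key : Nat) (v : String) (h : tget tree (key : Int) = some v) :
    RPre tree key = v :: (RPre tree (2*key+2) ++ RPre tree (2*key+1)) := by
  rw [RPre]; split <;> simp_all

theorem RPre_none (tree : List (Int × String)) (key : Nat) (h : tget tree (key : Int) = none) :
    RPre tree key = [] := by
  rw [RPre]; split <;> simp_all

theorem travPre_eq (tree : List (Int × String)) (key : Nat) (word : List String) :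
    travPre tree key word = word ++ EPre tree key := by
  fun_induction travPre tree key word with
  | case1 key word v h ih1 ih2 => rw [ih2, ih1, EPre_some tree key v h]; simp
  | case2 key word h => rw [EPre_none tree key h]; simp

theorem travIn_eq (tree : List (Int × String)) (key : Nat) (word : List String) :
    travIn tree key word = word ++ EIn tree key := by
  fun_induction travIn tree key word with
  | case1 key word v h ih1 ih2 => rw [ih2, ih1, EIn_some tree key v h]; simp
  | case2 key word h => rw [EIn_none tree key h]; simp

theorem travPost_eq (tree : List (Int × String)) (key : Nat) (word : List String) :
    travPost tree key word = word ++ EPost tree key := by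
  fun_induction travPost tree key word with
  | case1 key word v h ih1 ih2 => rw [ih2, ih1, EPost_some tree key v h]; simp
  | case2 key word h => rw [EPost_none tree key h]; simp

theorem loopPre_eq (tree : List (Int × String)) (stack : List Nat) (out : List String) :
    loopPre tree stack out = out ++ (stack.map (EPre tree)).flatten := by
  fun_induction loopPre tree stack out with
  | case1 out => simp
  | case2 out k rest v h ih => rw [ih]; simp [EPre_some tree k v h]
  | case3 out k rest h ih => rw [ih]; simp [EPre_none tree k h]

theorem loopPost_eq (tree : List (Int × String)) (stack : List Nat) (out : List String) :
    loopPost tree stack out = out ++ (stack.map (RPre tree)).flatten := by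
  fun_induction loopPost tree stack out with
  | case1 out => simp
  | case2 out k rest v h ih => rw [ih]; simp [RPre_some tree k v h]
  | case3 out k rest h ih => rw [ih]; simp [RPre_none tree k h]

theorem RPre_reverse (tree : List (Int × String)) (key : Nat) :
    (RPre tree key).reverse = EPost tree key := by
  fun_induction RPre tree key with
  | case1 key v h ih1 ih2 => rw [EPost_some tree key v h]; simp [ih1, ih2]
  | case2 key h => rw [EPost_none tree key h]; simp

theorem loopIn_eq (tree : List (Int × String)) (cur : Nat) (stack : List Nat) (out : List String) :
    loopIn tree cur stack out =
      out ++ EIn tree cur ++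
        (stack.map (fun (k : Nat) => (tget tree (k : Int)).getD "" :: EIn tree (2*k+2))).flatten := by
  fun_induction loopIn tree cur stack out with
  | case1 cur stack out v h ih => rw [ih, EIn_some tree cur v h]; simp [h]
  | case2 cur out h => rw [EIn_none tree cur h]; simp
  | case3 cur out h k rest ih => rw [ih, EIn_none tree cur h]; simp

theorem flat_intersperse_nil (xs : List (List Char)) :
    (List.intersperse ([] : List Char) xs).flatten = xs.flatten := by
  induction xs with
  | nil => simp
  | cons x r ih =>
    cases r with
    | nil => simp
    | cons y t => simp_all [List.intersperse]

theorem join_empty_eq_foldl (l : List String) :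
    PySem.Str.join "" l = l.foldl (fun r c => r ++ c) "" := by
  have h1 : ∀ (init : String),
      (l.foldl (fun r c => r ++ c) init).toList = init.toList ++ (l.map String.toList).flatten := by
    induction l with
    | nil => simp
    | cons x xs ih => intro init; simp [ih]
  apply String.toList_injective
  rw [h1 ""]
  simp [PySem.Str.join, PySem.Chars.join, List.intercalate, flat_intersperse_nil]

theorem pre_order_eq (tree : List (Int × String)) : pre_order tree = pre_order_alt tree := by
  unfold pre_order pre_order_alt
  rw [loopPre_eq, travPre_eq]; simp

theorem in_order_eq (tree : List (Int × String)) : in_order tree = in_order_alt tree := by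
  unfold in_order in_order_alt
  rw [loopIn_eq, travIn_eq]; simp

theorem post_order_eq (tree : List (Int × String)) : post_order tree = post_order_alt tree := by
  unfold post_order post_order_alt
  rw [loopPost_eq, travPost_eq]
  simp [RPre_reverse]

theorem breadth_first_eq (tree : List (Int × String)) : breadth_first tree = bf_alt tree := by
  unfold breadth_first bf_alt
  rw [join_empty_eq_foldl]

-- A's (count, used, true_trav) fold collapses to B's single-list fold
theorem fold_state_eq (words : List String) (cands : List String) : ∀ (t : List String),
    cands.foldl
      (fun (s : Int × List String × List String) trav =>
        if words.contains trav && !(s.2.1.contains trav) then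
          (s.1 + 1, s.2.1 ++ [trav], s.2.2 ++ [trav])
        else s)
      (((t.length : Int)), t, t)
    = (((cands.foldl (fun (acc : List String) t' =>
          if words.contains t' && !(acc.contains t') then acc ++ [t'] else acc) t).length : Int),
       cands.foldl (fun (acc : List String) t' =>
          if words.contains t' && !(acc.contains t') then acc ++ [t'] else acc) t,
       cands.foldl (fun (acc : List String) t' =>
          if words.contains t' && !(acc.contains t') then acc ++ [t'] else acc) t) := by
  induction cands with
  | nil => intro t; simp
  | cons x xs ih =>
    intro t
    simp only [List.foldl]
    by_cases hcond : (words.contains x && !(t.contains x)) = true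
    · simp only [hcond, if_true]
      have h1 : ((t.length : Int)) + 1 = (((t ++ [x]).length : Int)) := by
        simp
      rw [h1]
      exact ih (t ++ [x])
    · simp only [hcond, Bool.false_eq_true, if_false]
      exact ih t

-- ===== VERDICT (by name: the statement is the Claim_ definition above) =====
theorem check_tree_spec : Claim_equal_check_tree := by
  intro tree n words _
  unfold Spec_check_tree check_tree check_tree_alt
  rw [pre_order_eq, in_order_eq, post_order_eq, breadth_first_eq]
  have hf := fold_state_eq words
    [pre_order_alt tree, in_order_alt tree, post_order_alt tree, bf_alt tree] []
  simp only [List.length_nil, Nat.cast_zero] at hf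
  simp only [hf]
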